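-- pv_equiv track=rewrite | github.com/patleeman/Markov_Tells_A_Story | scanner.py | convert_punctuation
-- ===== SOURCE A (Python) =====
-- def convert_punctuation(text):
--     replacement = {
--             "<PERIOD>": ".",
--             "<COMMA>": ",",
--             "<SEMICOLON>": ";",
--             "<COLON>": ":",
--             "<EXCLAMATION>": "!",
--             "<QUESTION>": "?",
--         }
--
--     new_text = text
--     for item in replacement.keys():
--         new_text = new_text.replace(item, replacement[item])
--
--     return new_text
-- ===== SOURCE B (Python) =====
-- def convert_punctuation(text):
--     replacement = {
--             "<PERIOD>": ".",
--             "<COMMA>": ",",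
--             "<SEMICOLON>": ";",
--             "<COLON>": ":",
--             "<EXCLAMATION>": "!",
--             "<QUESTION>": "?",
--         }
--     tokens = list(replacement.items())
--     out = []
--     i = 0
--     n = len(text)
--     while i < n:
--         for tok, punct in tokens:
--             if text.startswith(tok, i):
--                 out.append(punct)
--                 i += len(tok)
--                 break
--         else:
--             out.append(text[i])
--             i += 1
--     return "".join(out)
-- ===== Notes on version B (the rewrite author's own statement) =====
-- stated objective: alternative
-- what changed: B makes one left-to-right scan over the text, matching any of the six placeholder tokens at the current position and emitting its punctuation, instead of A's six sequential full-text str.replace passes.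
import Mathlib
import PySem

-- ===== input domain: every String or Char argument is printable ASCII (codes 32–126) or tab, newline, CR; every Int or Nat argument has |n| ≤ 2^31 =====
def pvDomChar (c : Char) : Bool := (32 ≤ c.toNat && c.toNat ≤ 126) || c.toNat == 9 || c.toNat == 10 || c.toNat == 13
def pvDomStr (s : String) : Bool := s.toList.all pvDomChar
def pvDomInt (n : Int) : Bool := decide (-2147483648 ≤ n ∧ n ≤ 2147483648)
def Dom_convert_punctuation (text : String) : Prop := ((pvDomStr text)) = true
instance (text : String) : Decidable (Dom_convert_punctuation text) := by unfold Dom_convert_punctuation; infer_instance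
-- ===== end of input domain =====

-- B replaces the six placeholder tokens in ONE left-to-right scan instead of A's six sequential full-text replace passes (alternative decomposition, same result).

-- ===== PORT A =====
def convert_punctuation (text : String) : String :=
  let replacement : PySem.Dict String String :=
    ((((((PySem.Dict.empty).insert "<PERIOD>" ".").insert "<COMMA>" ",").insert "<SEMICOLON>" ";").insert "<COLON>" ":").insert "<EXCLAMATION>" "!").insert "<QUESTION>" "?"
  replacement.keys.foldl (fun new_text item => PySem.Str.replace new_text item (replacement.getD item "")) text

-- ===== PORT B =====
-- the while-loop of Source B: at each position try the six tokens in dict order, else copy the character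
def cpScan : List Char → List Char
  | [] => []
  | c :: t =>
    if "<PERIOD>".toList.isPrefixOf (c :: t) then '.' :: cpScan (t.drop 7)
    else if "<COMMA>".toList.isPrefixOf (c :: t) then ',' :: cpScan (t.drop 6)
    else if "<SEMICOLON>".toList.isPrefixOf (c :: t) then ';' :: cpScan (t.drop 10)
    else if "<COLON>".toList.isPrefixOf (c :: t) then ':' :: cpScan (t.drop 6)
    else if "<EXCLAMATION>".toList.isPrefixOf (c :: t) then '!' :: cpScan (t.drop 12)
    else if "<QUESTION>".toList.isPrefixOf (c :: t) then '?' :: cpScan (t.drop 9)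
    else c :: cpScan t
termination_by l => l.length
decreasing_by all_goals simp [List.length_drop]

def convert_punctuation_alt (text : String) : String :=
  String.ofList (cpScan text.toList)

-- ===== PRECONDITION & SPEC =====
def Spec_convert_punctuation (text : String) (out : String) : Prop := out = convert_punctuation_alt text
instance (text : String) (out : String) : Decidable (Spec_convert_punctuation text out) := by unfold Spec_convert_punctuation; infer_instance

-- ===== CLAIM (what is proved, stated in full; the proofs are below) =====
def Claim_equal_convert_punctuation : Prop := ∀ (text : String), Dom_convert_punctuation text → Spec_convert_punctuation text (convert_punctuation text)

-- ===== LEMMAS AND PROOFS =====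

-- a structural form of Python's str.replace (left-to-right, non-overlapping)
def repl (old new : List Char) : List Char → List Char
  | [] => []
  | c :: t =>
    if old.isPrefixOf (c :: t) then new ++ repl old new (t.drop (old.length - 1))
    else c :: repl old new t
termination_by l => l.length
decreasing_by all_goals simp [List.length_drop]

theorem repl_nil (old new : List Char) : repl old new [] = [] := by rw [repl]

theorem repl_cons (old new : List Char) (c : Char) (t : List Char) :
    repl old new (c :: t) = if old.isPrefixOf (c :: t) then new ++ repl old new (t.drop (old.length - 1))
    else c :: repl old new t := by rw [repl]

theorem cpScan_cons (c : Char) (t : List Char) :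
    cpScan (c :: t) =
    (if "<PERIOD>".toList.isPrefixOf (c :: t) then '.' :: cpScan (t.drop 7)
    else if "<COMMA>".toList.isPrefixOf (c :: t) then ',' :: cpScan (t.drop 6)
    else if "<SEMICOLON>".toList.isPrefixOf (c :: t) then ';' :: cpScan (t.drop 10)
    else if "<COLON>".toList.isPrefixOf (c :: t) then ':' :: cpScan (t.drop 6)
    else if "<EXCLAMATION>".toList.isPrefixOf (c :: t) then '!' :: cpScan (t.drop 12)
    else if "<QUESTION>".toList.isPrefixOf (c :: t) then '?' :: cpScan (t.drop 9)
    else c :: cpScan t) := by rw [cpScan]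

theorem go_eq_repl (old new : List Char) (ho : old ≠ []) :
    ∀ (fuel : Nat) (l acc : List Char), l.length ≤ fuel →
      PySem.Chars.replace.go old new fuel l acc = acc.reverse ++ repl old new l := by
  intro fuel
  induction fuel with
  | zero =>
    intro l acc hl
    have : l = [] := by cases l <;> simp_all
    subst this
    simp [PySem.Chars.replace.go, repl_nil]
  | succ n ih =>
    intro l acc hl
    match l with
    | [] => simp [PySem.Chars.replace.go, repl_nil]
    | c :: t =>
      obtain ⟨o, u, rfl⟩ : ∃ o u, old = o :: u := by
        cases old with
        | nil => exact absurd rfl ho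
        | cons o u => exact ⟨o, u, rfl⟩
      rw [show PySem.Chars.replace.go (o :: u) new (n+1) (c :: t) acc
            = if (o :: u).isPrefixOf (c :: t)
              then PySem.Chars.replace.go (o :: u) new n ((c :: t).drop (o :: u).length) (new.reverse ++ acc)
              else PySem.Chars.replace.go (o :: u) new n t (c :: acc) from by
            simp [PySem.Chars.replace.go]]
      by_cases hp : (o :: u).isPrefixOf (c :: t)
      · rw [if_pos hp, ih _ _ (by simp at hl ⊢; omega), repl_cons, if_pos hp]
        simp [List.length_cons]
      · rw [if_neg hp, ih _ _ (by simp at hl ⊢; omega), repl_cons, if_neg hp]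
        simp

theorem replace_eq_repl (s old new : List Char) (ho : old ≠ []) :
    PySem.Chars.replace s old new = repl old new s := by
  rw [PySem.Chars.replace]
  rw [if_neg (by simpa [List.isEmpty_iff] using ho)]
  simpa using go_eq_repl old new ho s.length s [] le_rfl

-- replacing a token by a single character r ∉ u never creates a new occurrence of u at the front
theorem not_prefix_repl (old : List Char) (r : Char) :
    ∀ (X u : List Char), u ≠ [] → r ∉ u → ¬ u <+: X → ¬ u <+: repl old [r] X := by
  intro X
  induction X with
  | nil =>
    intro u hu _ _
    rw [repl_nil]
    simpa using hu
  | cons c t ih =>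
    intro u hu hr hX
    match u, hu with
    | u0 :: u', _ =>
      by_cases hp : old.isPrefixOf (c :: t)
      · rw [repl_cons, if_pos hp]
        intro h
        exact hr ((List.cons_prefix_cons.mp h).1 ▸ List.mem_cons_self)
      · rw [repl_cons, if_neg hp]
        intro h
        obtain ⟨h1, h2⟩ := List.cons_prefix_cons.mp h
        subst h1
        match u', h2 with
        | [], _ => exact hX (by simp)
        | v :: u'', h2 =>
          exact ih (v :: u'') (by simp) (fun hm => hr (List.mem_cons_of_mem _ hm))
            (fun hpre => hX (List.cons_prefix_cons.mpr ⟨rfl, hpre⟩)) h2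

theorem repl_cons_not_prefix {old : List Char} {c : Char} {t : List Char} (new : List Char)
    (h : ¬ old <+: (c :: t)) : repl old new (c :: t) = c :: repl old new t := by
  rw [repl_cons, if_neg (fun hb => h (List.isPrefixOf_iff_prefix.mp hb))]

-- the token tails (after the leading '<')
def uP : List Char := ['P','E','R','I','O','D','>']
def uC : List Char := ['C','O','M','M','A','>']
def uS : List Char := ['S','E','M','I','C','O','L','O','N','>']
def uCo : List Char := ['C','O','L','O','N','>']
def uE : List Char := ['E','X','C','L','A','M','A','T','I','O','N','>']
def uQ : List Char := ['Q','U','E','S','T','I','O','N','>']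

-- A's six-pass result, on lists
def chainA (s : List Char) : List Char :=
  repl ('<' :: uQ) ['?'] (repl ('<' :: uE) ['!'] (repl ('<' :: uCo) [':']
    (repl ('<' :: uS) [';'] (repl ('<' :: uC) [','] (repl ('<' :: uP) ['.'] s)))))

theorem chain_eq_scan : ∀ (n : Nat) (s : List Char), s.length ≤ n → chainA s = cpScan s := by
  intro n
  induction n with
  | zero =>
    intro s hs
    have : s = [] := by cases s <;> simp_all
    subst this
    simp [chainA, repl_nil, cpScan]
  | succ n ih =>
    intro s hs
    match s with
    | [] => simp [chainA, repl_nil, cpScan]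
    | c :: t =>
      by_cases h1 : ('<' :: uP) <+: (c :: t)
      · obtain ⟨rest, hrest⟩ := h1
        rw [← hrest] at hs ⊢
        have hr := ih rest (by simp [uP] at hs ⊢; omega)
        simp only [chainA] at hr ⊢
        simp [repl_cons, cpScan_cons, List.isPrefixOf, uP, uC, uS, uCo, uE, uQ] at hr ⊢
        exact hr
      · by_cases h2 : ('<' :: uC) <+: (c :: t)
        · obtain ⟨rest, hrest⟩ := h2
          rw [← hrest] at hs ⊢
          have hr := ih rest (by simp [uC] at hs ⊢; omega)
          simp only [chainA] at hr ⊢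
          simp [repl_cons, cpScan_cons, List.isPrefixOf, uP, uC, uS, uCo, uE, uQ] at hr ⊢
          exact hr
        · by_cases h3 : ('<' :: uS) <+: (c :: t)
          · obtain ⟨rest, hrest⟩ := h3
            rw [← hrest] at hs ⊢
            have hr := ih rest (by simp [uS] at hs ⊢; omega)
            simp only [chainA] at hr ⊢
            simp [repl_cons, cpScan_cons, List.isPrefixOf, uP, uC, uS, uCo, uE, uQ] at hr ⊢
            exact hr
          · by_cases h4 : ('<' :: uCo) <+: (c :: t)
            · obtain ⟨rest, hrest⟩ := h4
              rw [← hrest] at hs ⊢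
              have hr := ih rest (by simp [uCo] at hs ⊢; omega)
              simp only [chainA] at hr ⊢
              simp [repl_cons, cpScan_cons, List.isPrefixOf, uP, uC, uS, uCo, uE, uQ] at hr ⊢
              exact hr
            · by_cases h5 : ('<' :: uE) <+: (c :: t)
              · obtain ⟨rest, hrest⟩ := h5
                rw [← hrest] at hs ⊢
                have hr := ih rest (by simp [uE] at hs ⊢; omega)
                simp only [chainA] at hr ⊢
                simp [repl_cons, cpScan_cons, List.isPrefixOf, uP, uC, uS, uCo, uE, uQ] at hr ⊢
                exact hr
              · by_cases h6 : ('<' :: uQ) <+: (c :: t)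
                · obtain ⟨rest, hrest⟩ := h6
                  rw [← hrest] at hs ⊢
                  have hr := ih rest (by simp [uQ] at hs ⊢; omega)
                  simp only [chainA] at hr ⊢
                  simp [repl_cons, cpScan_cons, List.isPrefixOf, uP, uC, uS, uCo, uE, uQ] at hr ⊢
                  exact hr
                · -- no token matches at this position
                  have ht := ih t (by simp at hs; omega)
                  by_cases hc : c = '<'
                  · subst hc
                    -- peel one '<' off every pass, using that no pass can create a token
                    have k1 : ¬ uC <+: repl ('<' :: uP) ['.'] t :=
                      not_prefix_repl _ _ t uC (by decide) (by decide)
                        (fun hp => h2 (List.cons_prefix_cons.mpr ⟨rfl, hp⟩))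
                    have k2 : ¬ uS <+: repl ('<' :: uC) [','] (repl ('<' :: uP) ['.'] t) :=
                      not_prefix_repl _ _ _ uS (by decide) (by decide)
                        (not_prefix_repl _ _ t uS (by decide) (by decide)
                          (fun hp => h3 (List.cons_prefix_cons.mpr ⟨rfl, hp⟩)))
                    have k3 : ¬ uCo <+: repl ('<' :: uS) [';'] (repl ('<' :: uC) [','] (repl ('<' :: uP) ['.'] t)) :=
                      not_prefix_repl _ _ _ uCo (by decide) (by decide)
                        (not_prefix_repl _ _ _ uCo (by decide) (by decide)
                          (not_prefix_repl _ _ t uCo (by decide) (by decide)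
                            (fun hp => h4 (List.cons_prefix_cons.mpr ⟨rfl, hp⟩))))
                    have k4 : ¬ uE <+: repl ('<' :: uCo) [':'] (repl ('<' :: uS) [';'] (repl ('<' :: uC) [','] (repl ('<' :: uP) ['.'] t))) :=
                      not_prefix_repl _ _ _ uE (by decide) (by decide)
                        (not_prefix_repl _ _ _ uE (by decide) (by decide)
                          (not_prefix_repl _ _ _ uE (by decide) (by decide)
                            (not_prefix_repl _ _ t uE (by decide) (by decide)
                              (fun hp => h5 (List.cons_prefix_cons.mpr ⟨rfl, hp⟩)))))
                    have k5 : ¬ uQ <+: repl ('<' :: uE) ['!'] (repl ('<' :: uCo) [':'] (repl ('<' :: uS) [';'] (repl ('<' :: uC) [','] (repl ('<' :: uP) ['.'] t)))) :=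
                      not_prefix_repl _ _ _ uQ (by decide) (by decide)
                        (not_prefix_repl _ _ _ uQ (by decide) (by decide)
                          (not_prefix_repl _ _ _ uQ (by decide) (by decide)
                            (not_prefix_repl _ _ _ uQ (by decide) (by decide)
                              (not_prefix_repl _ _ t uQ (by decide) (by decide)
                                (fun hp => h6 (List.cons_prefix_cons.mpr ⟨rfl, hp⟩))))))
                    have e : chainA ('<' :: t) = '<' :: chainA t := by
                      simp only [chainA]
                      rw [repl_cons_not_prefix _ h1,
                          repl_cons_not_prefix _ (fun h => k1 (List.cons_prefix_cons.mp h).2),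
                          repl_cons_not_prefix _ (fun h => k2 (List.cons_prefix_cons.mp h).2),
                          repl_cons_not_prefix _ (fun h => k3 (List.cons_prefix_cons.mp h).2),
                          repl_cons_not_prefix _ (fun h => k4 (List.cons_prefix_cons.mp h).2),
                          repl_cons_not_prefix _ (fun h => k5 (List.cons_prefix_cons.mp h).2)]
                    have e' : cpScan ('<' :: t) = '<' :: cpScan t := by
                      rw [cpScan_cons]
                      rw [if_neg (fun hb => h1 (by simpa [uP] using List.isPrefixOf_iff_prefix.mp hb)),
                          if_neg (fun hb => h2 (by simpa [uC] using List.isPrefixOf_iff_prefix.mp hb)),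
                          if_neg (fun hb => h3 (by simpa [uS] using List.isPrefixOf_iff_prefix.mp hb)),
                          if_neg (fun hb => h4 (by simpa [uCo] using List.isPrefixOf_iff_prefix.mp hb)),
                          if_neg (fun hb => h5 (by simpa [uE] using List.isPrefixOf_iff_prefix.mp hb)),
                          if_neg (fun hb => h6 (by simpa [uQ] using List.isPrefixOf_iff_prefix.mp hb))]
                    rw [e, e', ht]
                  · -- head is not '<': every pass and the scan copy it
                    have hb : ('<' == c) = false := by
                      simp
                      exact fun h => hc h.symm
                    simp only [chainA] at ht ⊢
                    simp [repl_cons, cpScan_cons, List.isPrefixOf, uP, uC, uS, uCo, uE, uQ, hb] at ht ⊢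
                    exact ht

theorem toList_A (text : String) :
    convert_punctuation text = String.ofList (chainA text.toList) := by
  have hd : convert_punctuation text
      = List.foldl (fun new_text item => PySem.Str.replace new_text item
          ((((((((PySem.Dict.empty).insert "<PERIOD>" ".").insert "<COMMA>" ",").insert "<SEMICOLON>" ";").insert "<COLON>" ":").insert "<EXCLAMATION>" "!").insert "<QUESTION>" "?" : PySem.Dict String String).getD item ""))
          text
          ["<PERIOD>", "<COMMA>", "<SEMICOLON>", "<COLON>", "<EXCLAMATION>", "<QUESTION>"] := by
    unfold convert_punctuation
    rfl
  rw [hd]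
  simp only [List.foldl_cons, List.foldl_nil]
  rw [show ((((((((PySem.Dict.empty).insert "<PERIOD>" ".").insert "<COMMA>" ",").insert "<SEMICOLON>" ";").insert "<COLON>" ":").insert "<EXCLAMATION>" "!").insert "<QUESTION>" "?" : PySem.Dict String String).getD "<PERIOD>" "") = "." from by decide,
      show ((((((((PySem.Dict.empty).insert "<PERIOD>" ".").insert "<COMMA>" ",").insert "<SEMICOLON>" ";").insert "<COLON>" ":").insert "<EXCLAMATION>" "!").insert "<QUESTION>" "?" : PySem.Dict String String).getD "<COMMA>" "") = "," from by decide,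
      show ((((((((PySem.Dict.empty).insert "<PERIOD>" ".").insert "<COMMA>" ",").insert "<SEMICOLON>" ";").insert "<COLON>" ":").insert "<EXCLAMATION>" "!").insert "<QUESTION>" "?" : PySem.Dict String String).getD "<SEMICOLON>" "") = ";" from by decide,
      show ((((((((PySem.Dict.empty).insert "<PERIOD>" ".").insert "<COMMA>" ",").insert "<SEMICOLON>" ";").insert "<COLON>" ":").insert "<EXCLAMATION>" "!").insert "<QUESTION>" "?" : PySem.Dict String String).getD "<COLON>" "") = ":" from by decide,
      show ((((((((PySem.Dict.empty).insert "<PERIOD>" ".").insert "<COMMA>" ",").insert "<SEMICOLON>" ";").insert "<COLON>" ":").insert "<EXCLAMATION>" "!").insert "<QUESTION>" "?" : PySem.Dict String String).getD "<EXCLAMATION>" "") = "!" from by decide,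
      show ((((((((PySem.Dict.empty).insert "<PERIOD>" ".").insert "<COMMA>" ",").insert "<SEMICOLON>" ";").insert "<COLON>" ":").insert "<EXCLAMATION>" "!").insert "<QUESTION>" "?" : PySem.Dict String String).getD "<QUESTION>" "") = "?" from by decide]
  simp only [PySem.Str.replace, String.toList_ofList]
  rw [replace_eq_repl _ _ _ (by decide), replace_eq_repl _ _ _ (by decide),
      replace_eq_repl _ _ _ (by decide), replace_eq_repl _ _ _ (by decide),
      replace_eq_repl _ _ _ (by decide), replace_eq_repl _ _ _ (by decide)]
  simp only [chainA, uP, uC, uS, uCo, uE, uQ]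
  rw [show "<PERIOD>".toList = ['<','P','E','R','I','O','D','>'] from by decide,
      show "<COMMA>".toList = ['<','C','O','M','M','A','>'] from by decide,
      show "<SEMICOLON>".toList = ['<','S','E','M','I','C','O','L','O','N','>'] from by decide,
      show "<COLON>".toList = ['<','C','O','L','O','N','>'] from by decide,
      show "<EXCLAMATION>".toList = ['<','E','X','C','L','A','M','A','T','I','O','N','>'] from by decide,
      show "<QUESTION>".toList = ['<','Q','U','E','S','T','I','O','N','>'] from by decide,
      show ".".toList = ['.'] from by decide, show ",".toList = [','] from by decide,
      show ";".toList = [';'] from by decide, show ":".toList = [':'] from by decide,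
      show "!".toList = ['!'] from by decide, show "?".toList = ['?'] from by decide]

-- ===== VERDICT (by name: the statement is the Claim_ definition above) =====
theorem convert_punctuation_spec : Claim_equal_convert_punctuation := by
  intro text _
  unfold Spec_convert_punctuation convert_punctuation_alt
  rw [toList_A, chain_eq_scan text.toList.length text.toList le_rfl]
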